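-- pv_equiv track=rewrite | github.com/benofben/arbit | Predictors.py | DictionaryMinN
-- ===== SOURCE A (Python) =====
-- def DictionaryMin(dictionary):
--     m=""
--     # pick the first key
--     for key in dictionary:
--         m = key
--         break
--     # find the min
--     for key in dictionary:
--         if dictionary[key] < dictionary[m]:
--             m = key
--     return m
--
-- def DictionaryMinN(dictionary, n):
--     d=dictionary.copy()
--     keys = []
--     for i in range(0,n):
--         if(d):
--             key = DictionaryMin(d)
--             keys.append(key)
--             d.pop(key)
--         else:
--             break
--     return keys
-- ===== SOURCE B (Python) =====
-- def DictionaryMinN(dictionary, n):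
--     if n <= 0:
--         return []
--     order = sorted(dictionary.items(), key=lambda kv: kv[1])
--     return [k for k, _ in order[:n]]
-- ===== Notes on version B (the rewrite author's own statement) =====
-- stated objective: faster
-- what changed: Replaces A's repeated linear min-scan-and-pop (n passes over the shrinking dict) with one stable sort of the items by value followed by taking the first n keys; Python's stable sort reproduces A's insertion-order tie-breaking.
import Mathlib
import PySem

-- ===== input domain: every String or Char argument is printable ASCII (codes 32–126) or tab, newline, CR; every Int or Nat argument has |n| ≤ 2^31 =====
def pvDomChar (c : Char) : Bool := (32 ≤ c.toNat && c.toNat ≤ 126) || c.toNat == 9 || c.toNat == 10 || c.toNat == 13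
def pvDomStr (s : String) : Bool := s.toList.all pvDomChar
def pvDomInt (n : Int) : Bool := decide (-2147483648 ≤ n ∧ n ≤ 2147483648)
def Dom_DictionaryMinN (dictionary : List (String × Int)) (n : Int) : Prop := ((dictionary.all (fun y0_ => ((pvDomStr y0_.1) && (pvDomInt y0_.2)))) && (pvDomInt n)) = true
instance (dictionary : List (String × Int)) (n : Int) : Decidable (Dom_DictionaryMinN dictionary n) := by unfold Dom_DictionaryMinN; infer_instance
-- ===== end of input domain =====

-- B replaces A's repeated min-scan-and-pop with one stable sort by value plus a prefix take (faster).


-- ===== PORT A =====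
-- helper DictionaryMin: first loop picks the first key (with break); second loop keeps
-- the first key of strictly smaller value.  'dictionary[key]' is a dict lookup; every
-- key looked up comes from the dict's own iteration, so the getD default is unreachable.
def DictionaryMin (d : PySem.Dict String Int) : String :=
  let m : String := match d.items with | [] => "" | p :: _ => p.1
  d.items.foldl (fun m p => if d.getD p.1 0 < d.getD m 0 then p.1 else m) m

-- the 'for i in range(0,n)' loop of DictionaryMinN: state (d, keys); break when d is empty
def DictionaryMinNLoop : Nat → PySem.Dict String Int → List String → List String
  | 0, _, keys => keys
  | fuel + 1, d, keys =>
    if d.items ≠ [] then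
      let key := DictionaryMin d
      DictionaryMinNLoop fuel (d.erase key) (keys ++ [key])
    else keys

def DictionaryMinN (dictionary : List (String × Int)) (n : Int) : List String :=
  DictionaryMinNLoop n.toNat (PySem.Dict.mk dictionary) []

-- ===== PORT B =====
def DictionaryMinN_alt (dictionary : List (String × Int)) (n : Int) : List String :=
  if n ≤ 0 then []
  else ((PySem.List.sorted dictionary (fun kv => kv.2) false).take n.toNat).map (fun kv => kv.1)

-- ===== PRECONDITION & SPEC =====
-- Pre_ excludes association lists with duplicate keys: a Python dict[str,int] argument can never
-- contain them, and A's first-match lookup/filtering pop on such lists is accidental.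
def Pre_DictionaryMinN (dictionary : List (String × Int)) (n : Int) : Prop :=
  (dictionary.map Prod.fst).Nodup
instance (dictionary : List (String × Int)) (n : Int) : Decidable (Pre_DictionaryMinN dictionary n) := by unfold Pre_DictionaryMinN; infer_instance
def pvWitness_DictionaryMinN : (List (String × Int)) × Int := ([("a", 2), ("b", 1), ("c", 2)], 2)

def Spec_DictionaryMinN (dictionary : List (String × Int)) (n : Int) (out : List String) : Prop := out = DictionaryMinN_alt dictionary n
instance (dictionary : List (String × Int)) (n : Int) (out : List String) : Decidable (Spec_DictionaryMinN dictionary n out) := by unfold Spec_DictionaryMinN; infer_instance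

-- ===== CLAIM (what is proved, stated in full; the proofs are below) =====
def Claim_equal_DictionaryMinN : Prop := ∀ (dictionary : List (String × Int)) (n : Int), Dom_DictionaryMinN dictionary n → Pre_DictionaryMinN dictionary n → Spec_DictionaryMinN dictionary n (DictionaryMinN dictionary n)

-- ===== LEMMAS AND PROOFS =====

-- the pair-valued first-minimum fold that A's key-valued fold tracks
def fMin (l : List (String × Int)) (p : String × Int) : String × Int :=
  l.foldl (fun m q => if q.2 < m.2 then q else m) p

theorem fMin_mem (l : List (String × Int)) (p : String × Int) :
    fMin l p = p ∨ fMin l p ∈ l := by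
  induction l generalizing p with
  | nil => exact Or.inl rfl
  | cons q t ih =>
    simp only [fMin, List.foldl_cons] at *
    by_cases hq : q.2 < p.2
    · simp only [hq, if_pos]
      rcases ih q with h | h
      · exact Or.inr (by rw [h]; exact List.mem_cons_self)
      · exact Or.inr (List.mem_cons_of_mem _ h)
    · simp only [hq, if_false]
      rcases ih p with h | h
      · exact Or.inl h
      · exact Or.inr (List.mem_cons_of_mem _ h)

theorem fMin_append (l : List (String × Int)) (p x : String × Int) :
    fMin (l ++ [x]) p = if x.2 < (fMin l p).2 then x else fMin l p := by
  simp [fMin, List.foldl_append]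

-- the first minimum of a nonempty list, as A's scan computes it (start at the head)
def hMin : List (String × Int) → String × Int
  | [] => ("", 0)
  | p :: t => fMin (p :: t) p

theorem hMin_mem (p : String × Int) (t : List (String × Int)) : hMin (p :: t) ∈ p :: t := by
  rcases fMin_mem (p :: t) p with h | h
  · rw [hMin, h]; exact List.mem_cons_self
  · rw [hMin]; exact h

-- A's DictionaryMin returns the key of the first value-minimal entry (under unique keys)
theorem dictionaryMin_eq_hMin (l : List (String × Int)) (hne : l ≠ [])
    (hnd : (l.map Prod.fst).Nodup) :
    DictionaryMin (PySem.Dict.mk l) = (hMin l).1 := by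
  obtain ⟨p, t, rfl⟩ := List.exists_cons_of_ne_nil hne
  have hlook : ∀ q ∈ p :: t, (PySem.Dict.mk (p :: t)).getD q.1 0 = q.2 := by
    intro q hq
    exact PySem.Dict.getD_of_mem_items (d := PySem.Dict.mk (p :: t)) hq hnd 0
  have key : ∀ (sub : List (String × Int)), sub ⊆ p :: t → ∀ r ∈ p :: t,
      sub.foldl (fun m q =>
        if (PySem.Dict.mk (p :: t)).getD q.1 0 < (PySem.Dict.mk (p :: t)).getD m 0 then q.1 else m) r.1
        = (sub.foldl (fun m q => if q.2 < m.2 then q else m) r).1 := by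
    intro sub
    induction sub with
    | nil => intro _ r _; rfl
    | cons q t' ih =>
      intro hsub r hr
      have hq : q ∈ p :: t := hsub List.mem_cons_self
      have ht' : t' ⊆ p :: t := fun a ha => hsub (List.mem_cons_of_mem _ ha)
      simp only [List.foldl_cons, hlook q hq, hlook r hr]
      by_cases hlt : q.2 < r.2
      · simp only [hlt, if_pos]; exact ih ht' q hq
      · simp only [hlt, if_false]; exact ih ht' r hr
  show (p :: t).foldl _ p.1 = _
  rw [hMin]
  exact key (p :: t) (fun a ha => ha) p List.mem_cons_self

-- one insertion step of the stable insertion sort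
theorem sorted_append_singleton (l : List (String × Int)) (x : String × Int) :
    PySem.List.sorted (l ++ [x]) (fun kv => kv.2) false =
      PySem.List.insertBy (fun a b => decide (a.2 < b.2)) x
        (PySem.List.sorted l (fun kv => kv.2) false) := by
  rw [PySem.List.sorted_eq_foldl_insertBy, PySem.List.sorted_eq_foldl_insertBy,
    List.foldl_append]
  rfl

-- the crux: the stable sort of a nonempty unique-key list starts with the first minimum,
-- followed by the stable sort of the list with that entry filtered out
theorem sorted_hMin (l : List (String × Int)) (hne : l ≠ [])
    (hnd : (l.map Prod.fst).Nodup) :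
    PySem.List.sorted l (fun kv => kv.2) false =
      hMin l ::
        PySem.List.sorted (l.filter (fun q => !(q.1 == (hMin l).1))) (fun kv => kv.2) false := by
  induction l using List.reverseRecOn with
  | nil => exact absurd rfl hne
  | append_singleton ys x ih =>
    have hnd' : (ys.map Prod.fst ++ [x.1]).Nodup := by simpa using hnd
    have hndys : (ys.map Prod.fst).Nodup := hnd'.of_append_left
    have hxfresh : x.1 ∉ ys.map Prod.fst := by
      intro hmem
      exact (List.disjoint_of_nodup_append hnd') hmem List.mem_cons_self
    match ys with
    | [] => simp [hMin, fMin, PySem.List.sorted, PySem.List.insertBy]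
    | p :: t =>
      have hm : hMin ((p :: t) ++ [x]) = if x.2 < (hMin (p :: t)).2 then x else hMin (p :: t) := by
        show fMin ((p :: t) ++ [x]) p = _
        rw [fMin_append]; rfl
      have hmem := hMin_mem p t
      have hS := ih (by simp) hndys
      rw [sorted_append_singleton, hS]
      by_cases hlt : x.2 < (hMin (p :: t)).2
      · -- x is the new strict minimum: it is inserted at the front
        have hxne : ∀ q ∈ p :: t, ¬(q.1 == x.1) = true := by
          intro q hq h
          exact hxfresh ((eq_of_beq h) ▸ List.mem_map_of_mem hq)
        have hfilter : ((p :: t) ++ [x]).filter (fun q => !(q.1 == x.1)) = p :: t := by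
          rw [List.filter_append]
          have h1 : (p :: t).filter (fun q => !(q.1 == x.1)) = p :: t :=
            List.filter_eq_self.mpr (by intro q hq; simpa using fun h => hxne q hq (by simpa using h))
          simp [h1]
        rw [hm, if_pos hlt, hfilter, hS]
        show PySem.List.insertBy _ x (hMin (p :: t) :: _) = _
        simp [PySem.List.insertBy, hlt]
      · -- the old minimum stays in front; x is inserted into the tail
        have hxm : ¬(x.1 == (hMin (p :: t)).1) = true := by
          intro h
          exact hxfresh ((eq_of_beq h) ▸ List.mem_map_of_mem hmem)
        have hfilter : ((p :: t) ++ [x]).filter (fun q => !(q.1 == (hMin (p :: t)).1)) =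
            (p :: t).filter (fun q => !(q.1 == (hMin (p :: t)).1)) ++ [x] := by
          rw [List.filter_append]
          simp [hxm]
        rw [hm, if_neg hlt, hfilter, sorted_append_singleton]
        show PySem.List.insertBy _ x (hMin (p :: t) :: _) = _
        simp [PySem.List.insertBy, hlt]

theorem loop_eq_take (fuel : Nat) (l : List (String × Int)) (acc : List String)
    (hnd : (l.map Prod.fst).Nodup) :
    DictionaryMinNLoop fuel (PySem.Dict.mk l) acc =
      acc ++ ((PySem.List.sorted l (fun kv => kv.2) false).take fuel).map (fun kv => kv.1) := by
  induction fuel generalizing l acc with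
  | zero => simp [DictionaryMinNLoop]
  | succ f ih =>
    match l with
    | [] => simp [DictionaryMinNLoop, PySem.List.sorted]
    | p :: t =>
      have hne : (p :: t) ≠ ([] : List (String × Int)) := by simp
      have hkey := dictionaryMin_eq_hMin (p :: t) hne hnd
      have herase : (PySem.Dict.mk (p :: t)).erase ((hMin (p :: t)).1) =
          PySem.Dict.mk ((p :: t).filter (fun q => !(q.1 == (hMin (p :: t)).1))) := rfl
      have hndf : (((p :: t).filter (fun q => !(q.1 == (hMin (p :: t)).1))).map Prod.fst).Nodup :=
        hnd.sublist (List.Sublist.map Prod.fst List.filter_sublist)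
      show (if (PySem.Dict.mk (p :: t)).items ≠ [] then _ else _) = _
      rw [if_pos (by simp)]
      show DictionaryMinNLoop f ((PySem.Dict.mk (p :: t)).erase (DictionaryMin (PySem.Dict.mk (p :: t))))
          (acc ++ [DictionaryMin (PySem.Dict.mk (p :: t))]) = _
      rw [hkey, herase, ih _ _ hndf, sorted_hMin (p :: t) hne hnd]
      simp

-- ===== VERDICT (by name: the statement is the Claim_ definition above) =====
theorem DictionaryMinN_spec : Claim_equal_DictionaryMinN := by
  intro dictionary n _ hpre
  unfold Spec_DictionaryMinN DictionaryMinN DictionaryMinN_alt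
  rw [loop_eq_take n.toNat dictionary [] hpre]
  by_cases hn : n ≤ 0
  · simp [hn, Int.toNat_of_nonpos hn]
  · simp [hn]
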